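-- pv_equiv track=rewrite | github.com/Derecichei/ISCIENCE-D-26-00600 | Leucine_Serine_GenbankAddition.py | classify_and_count_codons
-- ===== SOURCE A (Python) =====
-- def classify_and_count_codons(nucleotide_seq, codons, classifications):
--     """Classify and count codons in the sequence."""
--     codon_counts = {key: 0 for key in classifications.keys()}
--     total_count = 0
--
--     for i in range(0, len(nucleotide_seq) - 2, 3):
--         codon = nucleotide_seq[i:i + 3]
--         if (codon in codons) and (len(codon) == 3):
--             total_count += 1
--             for classification, codon_list in classifications.items():
--                 if codon in codon_list:
--                     codon_counts[classification] += 1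
--
--     return total_count, codon_counts
-- ===== SOURCE B (Python) =====
-- def classify_and_count_codons(nucleotide_seq, codons, classifications):
--     """Classify and count codons in the sequence."""
--     # Tabulate: one frequency table of the valid codons, built in a single scan.
--     counter = {}
--     for i in range(0, len(nucleotide_seq) - 2, 3):
--         codon = nucleotide_seq[i:i + 3]
--         if (codon in codons) and (len(codon) == 3):
--             counter[codon] = counter.get(codon, 0) + 1
--     total_count = sum(counter.values())
--     # Aggregate: each classification's count is the sum of the frequencies of its
--     # distinct codons; the per-chunk scan of every classification list disappears.
--     codon_counts = {classification: sum(counter.get(c, 0) for c in set(codon_list))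
--                     for classification, codon_list in classifications.items()}
--     return total_count, codon_counts
-- ===== Notes on version B (the rewrite author's own statement) =====
-- stated objective: faster
-- what changed: B builds a frequency table (Counter-style dict) of the valid codons in one scan and then computes each classification's count as the sum of the table entries of its distinct codons, instead of A's per-chunk inner loop over every classification list.
import Mathlib
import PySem

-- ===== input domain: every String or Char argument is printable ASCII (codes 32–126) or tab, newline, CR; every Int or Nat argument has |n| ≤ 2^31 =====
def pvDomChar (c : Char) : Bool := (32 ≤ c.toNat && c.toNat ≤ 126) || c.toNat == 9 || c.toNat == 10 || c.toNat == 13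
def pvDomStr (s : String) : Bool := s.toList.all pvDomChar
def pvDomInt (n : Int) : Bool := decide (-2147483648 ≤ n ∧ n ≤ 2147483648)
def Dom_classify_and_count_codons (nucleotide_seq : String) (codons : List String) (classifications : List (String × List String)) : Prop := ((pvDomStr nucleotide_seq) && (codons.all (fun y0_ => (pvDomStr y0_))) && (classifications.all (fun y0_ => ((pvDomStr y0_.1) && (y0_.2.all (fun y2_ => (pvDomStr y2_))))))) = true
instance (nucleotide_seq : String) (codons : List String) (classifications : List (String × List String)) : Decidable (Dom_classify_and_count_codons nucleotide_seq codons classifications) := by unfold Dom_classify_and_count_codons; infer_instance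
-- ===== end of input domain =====

-- B tabulates the valid codons into one frequency dict in a single scan and sums table
-- entries per classification, replacing A's per-chunk inner loop over all classification lists.

-- ===== PORT A =====
def classify_and_count_codons (nucleotide_seq : String) (codons : List String) (classifications : List (String × List String)) : Int × (List (String × Int)) :=
  -- codon_counts = {key: 0 for key in classifications.keys()}
  let d0 : PySem.Dict String Int :=
    classifications.foldl (fun d kv => d.insert kv.1 0) PySem.Dict.empty
  -- for i in range(0, len(nucleotide_seq) - 2, 3): …
  let res :=
    (PySem.List.pyRange 0 ((nucleotide_seq.toList.length : Int) - 2) 3).foldl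
      (fun (st : Int × PySem.Dict String Int) i =>
        let codon := PySem.List.slice nucleotide_seq.toList (some i) (some (i + 3))
        if codons.any (fun s => s.toList == codon) && (codon.length == 3) then
          (st.1 + 1,
           classifications.foldl
             (fun d kv =>
               if kv.2.any (fun s => s.toList == codon) then d.modify kv.1 0 (· + 1) else d)
             st.2)
        else st)
      ((0 : Int), d0)
  (res.1, res.2.items)

-- ===== PORT B =====
def classify_and_count_codons_alt (nucleotide_seq : String) (codons : List String) (classifications : List (String × List String)) : Int × (List (String × Int)) :=
  -- counter = {}; for i in range(…): … counter[codon] = counter.get(codon, 0) + 1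
  let counter : PySem.Dict (List Char) Int :=
    (PySem.List.pyRange 0 ((nucleotide_seq.toList.length : Int) - 2) 3).foldl
      (fun (d : PySem.Dict (List Char) Int) i =>
        let codon := PySem.List.slice nucleotide_seq.toList (some i) (some (i + 3))
        if codons.any (fun s => s.toList == codon) && (codon.length == 3) then
          d.insert codon (d.getD codon 0 + 1)
        else d)
      PySem.Dict.empty
  -- total_count = sum(counter.values())
  let total := counter.values.foldl (· + ·) (0 : Int)
  -- codon_counts = {k: sum(counter.get(c, 0) for c in set(lst)) for k, lst in classifications.items()}
  (total,
   classifications.map (fun kv =>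
     (kv.1, (PySem.Set.ofList kv.2).foldl (fun acc s => acc + counter.getD s.toList 0) (0 : Int))))

-- ===== PRECONDITION & SPEC =====
-- Pre_ excludes association lists with duplicate classification keys: A's parameter is a
-- Python dict, which cannot hold duplicate keys, so such lists are ambiguous representations.
def Pre_classify_and_count_codons (nucleotide_seq : String) (codons : List String) (classifications : List (String × List String)) : Prop :=
  (classifications.map Prod.fst).Nodup
instance (nucleotide_seq : String) (codons : List String) (classifications : List (String × List String)) : Decidable (Pre_classify_and_count_codons nucleotide_seq codons classifications) := by unfold Pre_classify_and_count_codons; infer_instance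

def pvWitness_classify_and_count_codons : String × List String × (List (String × List String)) :=
  ("ATGAAA", ["ATG", "AAA"], [("M", ["ATG"]), ("K", ["AAA"])])

def Spec_classify_and_count_codons (nucleotide_seq : String) (codons : List String) (classifications : List (String × List String)) (out : Int × (List (String × Int))) : Prop := out = classify_and_count_codons_alt nucleotide_seq codons classifications
instance (nucleotide_seq : String) (codons : List String) (classifications : List (String × List String)) (out : Int × (List (String × Int))) : Decidable (Spec_classify_and_count_codons nucleotide_seq codons classifications out) := by unfold Spec_classify_and_count_codons; infer_instance

-- ===== CLAIM (what is proved, stated in full; the proofs are below) =====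
def Claim_equal_classify_and_count_codons : Prop := ∀ (nucleotide_seq : String) (codons : List String) (classifications : List (String × List String)), Dom_classify_and_count_codons nucleotide_seq codons classifications → Pre_classify_and_count_codons nucleotide_seq codons classifications → Spec_classify_and_count_codons nucleotide_seq codons classifications (classify_and_count_codons nucleotide_seq codons classifications)

-- ===== LEMMAS AND PROOFS =====

-- A's initialisation dict: items are the classification keys paired with 0.
theorem items_init (cls : List (String × List String)) (hnd : (cls.map Prod.fst).Nodup) :
    (cls.foldl (fun d kv => d.insert kv.1 0) (PySem.Dict.empty : PySem.Dict String Int)).items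
      = cls.map (fun kv => (kv.1, (0 : Int))) := by
  have := PySem.Dict.items_foldl_insert_fresh (l := cls) (k := Prod.fst)
      (v := fun _ => (0 : Int)) (d := (PySem.Dict.empty : PySem.Dict String Int))
      (by intro a _; simp) hnd
  simpa using this

-- A's inner loop over classifications: getD at a present key gains 1 iff the codon is in its list.
theorem inner_getD (codon : List Char) (cls : List (String × List String))
    (hnd : (cls.map Prod.fst).Nodup) (kv : String × List String) (hmem : kv ∈ cls)
    (d : PySem.Dict String Int) :
    ((cls.foldl (fun d kv =>
        if kv.2.any (fun s => s.toList == codon) then d.modify kv.1 0 (· + 1) else d) d).getD kv.1 0)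
      = d.getD kv.1 0 + (if kv.2.any (fun s => s.toList == codon) then 1 else 0) := by
  induction cls generalizing d with
  | nil => cases hmem
  | cons hd tl ih =>
    simp only [List.foldl_cons]
    rcases List.mem_cons.mp hmem with h | h
    · subst h
      have hnot : kv.1 ∉ tl.map Prod.fst := by
        simpa using (List.nodup_cons.mp hnd).1
      have tail_inv : ∀ (d' : PySem.Dict String Int) (tl' : List (String × List String)),
          kv.1 ∉ tl'.map Prod.fst →
          ((tl'.foldl (fun d kv =>
              if kv.2.any (fun s => s.toList == codon) then d.modify kv.1 0 (· + 1) else d) d').getD kv.1 0)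
            = d'.getD kv.1 0 := by
        intro d' tl' hn
        induction tl' generalizing d' with
        | nil => rfl
        | cons h2 t2 ih2 =>
          simp only [List.foldl_cons]
          simp only [List.map_cons, List.mem_cons, not_or] at hn
          have hne : kv.1 ≠ h2.1 := hn.1
          have hn' : kv.1 ∉ t2.map Prod.fst := hn.2
          by_cases hc : h2.2.any (fun s => s.toList == codon) = true
          · rw [if_pos hc, ih2 _ hn', PySem.Dict.getD_modify]
            simp [hne]
          · rw [if_neg hc, ih2 _ hn']
      by_cases hc : kv.2.any (fun s => s.toList == codon) = true
      · rw [if_pos hc, tail_inv _ _ hnot, PySem.Dict.getD_modify]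
        simp [hc]
      · rw [if_neg hc, tail_inv _ _ hnot]
        simp [hc]
    · have hnd' : (tl.map Prod.fst).Nodup := (List.nodup_cons.mp hnd).2
      have hne : kv.1 ≠ hd.1 := by
        intro he
        exact (List.nodup_cons.mp hnd).1 (he ▸ List.mem_map_of_mem h)
      by_cases hc : hd.2.any (fun s => s.toList == codon) = true
      · rw [if_pos hc, ih hnd' h]
        rw [PySem.Dict.getD_modify]
        simp [hne]
      · rw [if_neg hc, ih hnd' h]

-- A's inner loop does not change the key list.
theorem inner_keys (codon : List Char) (cls : List (String × List String))
    (d : PySem.Dict String Int) (hsub : ∀ kv ∈ cls, kv.1 ∈ d.keys) :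
    ((cls.foldl (fun d kv =>
        if kv.2.any (fun s => s.toList == codon) then d.modify kv.1 0 (· + 1) else d) d).keys)
      = d.keys := by
  induction cls generalizing d with
  | nil => rfl
  | cons hd tl ih =>
    simp only [List.foldl_cons]
    by_cases hc : hd.2.any (fun s => s.toList == codon) = true
    · rw [if_pos hc]
      have hk : (d.modify hd.1 0 (· + 1)).keys = d.keys := by
        have hcont : d.contains hd.1 = true := by
          rw [PySem.Dict.contains_iff_mem_keys]
          exact hsub hd (List.mem_cons_self)
        rw [PySem.Dict.keys_modify, PySem.Dict.keys_insert_of_contains _ _ hcont]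
      rw [ih _ (by intro kv hm; rw [hk]; exact hsub kv (List.mem_cons_of_mem _ hm)), hk]
    · rw [if_neg hc]
      exact ih _ (fun kv hm => hsub kv (List.mem_cons_of_mem _ hm))

-- A's outer-loop invariant, over an arbitrary index list.
theorem outer_inv (seq : List Char) (codons : List String) (cls : List (String × List String))
    (hnd : (cls.map Prod.fst).Nodup)
    (is : List Int) (t : Int) (d : PySem.Dict String Int)
    (hkeys : d.keys = cls.map Prod.fst) :
    let step := fun (st : Int × PySem.Dict String Int) (i : Int) =>
        let codon := PySem.List.slice seq (some i) (some (i + 3))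
        if codons.any (fun s => s.toList == codon) && (codon.length == 3) then
          (st.1 + 1,
           cls.foldl
             (fun d kv =>
               if kv.2.any (fun s => s.toList == codon) then d.modify kv.1 0 (· + 1) else d)
             st.2)
        else st
    let valid := ((is.map (fun i => PySem.List.slice seq (some i) (some (i + 3)))).filter
        (fun c => codons.any (fun s => s.toList == c) && (c.length == 3)))
    (is.foldl step (t, d)).1 = t + (valid.length : Int)
      ∧ (is.foldl step (t, d)).2.keys = cls.map Prod.fst
      ∧ ∀ kv ∈ cls, (is.foldl step (t, d)).2.getD kv.1 0
          = d.getD kv.1 0 + (valid.countP (fun c => kv.2.any (fun s => s.toList == c)) : Int) := by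
  intro step
  induction is generalizing t d with
  | nil => simp [hkeys]
  | cons i is ih =>
    simp only [List.foldl_cons, List.map_cons]
    set codon := PySem.List.slice seq (some i) (some (i + 3)) with hcodon
    by_cases hc : (codons.any (fun s => s.toList == codon) && (codon.length == 3)) = true
    · have hstep : step (t, d) i =
        (t + 1, cls.foldl (fun d kv =>
            if kv.2.any (fun s => s.toList == codon) then d.modify kv.1 0 (· + 1) else d) d) := by
        simp only [step]; rw [← hcodon, if_pos hc]
      rw [hstep]
      have hkeys' : (cls.foldl (fun d kv =>
          if kv.2.any (fun s => s.toList == codon) then d.modify kv.1 0 (· + 1) else d) d).keys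
            = cls.map Prod.fst := by
        rw [inner_keys codon cls d (by intro kv hm; rw [hkeys]; exact List.mem_map_of_mem hm)]
        exact hkeys
      obtain ⟨h1, h2, h3⟩ := ih (t + 1) _ hkeys'
      refine ⟨?_, h2, ?_⟩
      · rw [h1, List.filter_cons, if_pos hc]; simp only [List.length_cons]; push_cast; ring
      · intro kv hm
        rw [h3 kv hm, inner_getD codon cls hnd kv hm d]
        rw [List.filter_cons, if_pos hc, List.countP_cons]
        by_cases hin : (kv.2.any (fun s => s.toList == codon)) = true <;>
          simp [hin] <;> ring_nf
    · have hstep : step (t, d) i = (t, d) := by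
        simp only [step]; rw [← hcodon, if_neg hc]
      rw [hstep]
      obtain ⟨h1, h2, h3⟩ := ih t d hkeys
      refine ⟨?_, h2, ?_⟩
      · rw [h1, List.filter_cons, if_neg hc]
      · intro kv hm
        rw [h3 kv hm, List.filter_cons, if_neg hc]

-- Generic: a guarded fold over indices is a fold over the filtered mapped list.
theorem foldl_guard_map {α β σ : Type} (g : α → β) (p : β → Bool) (f : σ → β → σ)
    (l : List α) (init : σ) :
    l.foldl (fun st i => if p (g i) then f st (g i) else st) init
      = ((l.map g).filter p).foldl f init := by
  induction l generalizing init with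
  | nil => rfl
  | cons x xs ih =>
    by_cases h : p (g x) = true <;> simp [h, ih]

-- String.toList is injective.
theorem pv_toList_inj {s t : String} (h : s.toList = t.toList) : s = t := by
  exact String.toList_inj.mp h

-- sum(values) fold, concrete shape.
theorem foldl_add_eq_sum (l : List Int) (a : Int) :
    l.foldl (fun x1 x2 => x1 + x2) a = a + l.sum := by
  induction l generalizing a with
  | nil => simp
  | cons x xs ih => simp [ih]; ring

-- per-classification fold, concrete shape.
theorem foldl_add_getD (d : PySem.Dict (List Char) Int) (l : List String) (a : Int) :
    l.foldl (fun acc s => acc + d.getD s.toList 0) a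
      = a + (l.map (fun s => d.getD s.toList 0)).sum := by
  induction l generalizing a with
  | nil => simp
  | cons x xs ih => simp [ih]; ring

-- Exactly-one indicator over a nodup list containing the element (List Char keys).
theorem sum_ind_mem (c : List Char) (S : List (List Char)) (hnd : S.Nodup) (hc : c ∈ S) :
    (S.map (fun k => if k = c then (1 : Int) else 0)).sum = 1 := by
  induction S with
  | nil => cases hc
  | cons s S ih =>
    rcases List.mem_cons.mp hc with h | h
    · subst h
      have hz : (S.map (fun k => if k = c then (1 : Int) else 0)).sum = 0 := by
        apply List.sum_eq_zero
        intro x hx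
        obtain ⟨k, hk, rfl⟩ := List.mem_map.mp hx
        have hne : k ≠ c := fun he => (List.nodup_cons.mp hnd).1 (he ▸ hk)
        simp [hne]
      rw [List.map_cons, List.sum_cons, hz, if_pos rfl]
      ring
    · have hne : s ≠ c := fun he => (List.nodup_cons.mp hnd).1 (he ▸ h)
      rw [List.map_cons, List.sum_cons, if_neg hne, zero_add]
      exact ih (List.nodup_cons.mp hnd).2 h

-- Zero-or-one indicator over a nodup list of strings whose toList hits c.
theorem sum_ind_str (c : List Char) (D : List String) (hnd : D.Nodup) :
    (D.map (fun s => if s.toList = c then (1 : Int) else 0)).sum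
      = if D.any (fun s => s.toList == c) then 1 else 0 := by
  induction D with
  | nil => simp
  | cons s D ih =>
    rw [List.map_cons, List.sum_cons]
    by_cases h : s.toList = c
    · have hz : (D.map (fun t => if t.toList = c then (1 : Int) else 0)).sum = 0 := by
        apply List.sum_eq_zero
        intro x hx
        obtain ⟨t, ht, rfl⟩ := List.mem_map.mp hx
        have hts : t ≠ s := fun he => (List.nodup_cons.mp hnd).1 (he ▸ ht)
        have htc : t.toList ≠ c := fun he => hts (pv_toList_inj (he.trans h.symm))
        simp [htc]
      have hany : ((s :: D).any fun s => s.toList == c) = true := by simp [h]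
      rw [if_pos h, hz, if_pos hany]
      ring
    · have hstep : ((s :: D).any fun s => s.toList == c) = (D.any fun s => s.toList == c) := by
        simp [List.any_cons, h]
      rw [if_neg h, zero_add, ih (List.nodup_cons.mp hnd).2, hstep]

-- Sum of per-string counts over a nodup list = countP of membership.
theorem sum_count_eq_countP (D : List String) (hnd : D.Nodup) (valid : List (List Char)) :
    (D.map (fun s => (valid.count s.toList : Int))).sum
      = (valid.countP (fun c => D.any (fun s => s.toList == c)) : Int) := by
  induction valid with
  | nil =>
    rw [List.countP_nil, Nat.cast_zero]
    apply List.sum_eq_zero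
    intro x hx
    obtain ⟨s, -, rfl⟩ := List.mem_map.mp hx
    simp
  | cons c vs ih =>
    have hsplit : (D.map (fun s => ((c :: vs).count s.toList : Int))).sum
        = (D.map (fun s => (vs.count s.toList : Int))).sum
          + (D.map (fun s => if s.toList = c then (1 : Int) else 0)).sum := by
      rw [← List.sum_map_add]
      apply congrArg List.sum
      apply List.map_congr_left
      intro k _
      rw [List.count_cons]
      by_cases h : k.toList = c <;> simp [h]
      exact fun he => h he.symm
    rw [hsplit, ih, sum_ind_str c D hnd]
    by_cases h : (D.any fun s => s.toList == c) = true <;> simp [h]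

-- Sum of counts over the distinct elements = length.
theorem sum_count_self (valid : List (List Char)) :
    ((PySem.Set.ofList valid).map (fun k => (valid.count k : Int))).sum
      = (valid.length : Int) := by
  have hnd : (PySem.Set.ofList valid).Nodup := PySem.Set.nodup_ofList valid
  have hmem : ∀ x ∈ valid, x ∈ PySem.Set.ofList valid :=
    fun x hx => (PySem.Set.mem_ofList valid x).mpr hx
  generalize hS : PySem.Set.ofList valid = S at hnd hmem ⊢
  clear hS
  induction valid with
  | nil =>
    rw [List.length_nil, Nat.cast_zero]
    apply List.sum_eq_zero
    intro x hx
    obtain ⟨k, -, rfl⟩ := List.mem_map.mp hx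
    simp
  | cons c vs ih =>
    have hsplit : (S.map (fun k => ((c :: vs).count k : Int))).sum
        = (S.map (fun k => (vs.count k : Int))).sum
          + (S.map (fun k => if k = c then (1 : Int) else 0)).sum := by
      rw [← List.sum_map_add]
      apply congrArg List.sum
      apply List.map_congr_left
      intro k _
      rw [List.count_cons]
      by_cases h : k = c <;> simp [h]
      exact fun he => h he.symm
    rw [hsplit, ih (fun x hx => hmem x (List.mem_cons_of_mem _ hx)),
        sum_ind_mem c S hnd (hmem c List.mem_cons_self)]
    simp [List.length_cons]

-- any over set(l) = any over l.
theorem any_ofList (l : List String) (p : String → Bool) :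
    (PySem.Set.ofList l).any p = l.any p := by
  rw [Bool.eq_iff_iff, List.any_eq_true, List.any_eq_true]
  constructor
  · rintro ⟨s, hs, hp⟩; exact ⟨s, (PySem.Set.mem_ofList l s).mp hs, hp⟩
  · rintro ⟨s, hs, hp⟩; exact ⟨s, (PySem.Set.mem_ofList l s).mpr hs, hp⟩

-- ===== VERDICT (by name: the statement is the Claim_ definition above) =====
theorem classify_and_count_codons_spec : Claim_equal_classify_and_count_codons := by
  intro seq codons cls _hDom hPre
  unfold Spec_classify_and_count_codons classify_and_count_codons classify_and_count_codons_alt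
  have hnd : (cls.map Prod.fst).Nodup := hPre
  have hinit := items_init cls hnd
  have hkeys0 : (cls.foldl (fun d kv => d.insert kv.1 0)
      (PySem.Dict.empty : PySem.Dict String Int)).keys = cls.map Prod.fst := by
    show ((cls.foldl (fun d kv => d.insert kv.1 0)
      (PySem.Dict.empty : PySem.Dict String Int)).items.map Prod.fst) = cls.map Prod.fst
    rw [hinit, List.map_map]
    rfl
  obtain ⟨h1, h2, h3⟩ := outer_inv seq.toList codons cls hnd
      (PySem.List.pyRange 0 ((seq.toList.length : Int) - 2) 3) 0
      (cls.foldl (fun d kv => d.insert kv.1 0) PySem.Dict.empty) hkeys0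
  dsimp only at h1 h2 h3 ⊢
  set v := (((PySem.List.pyRange 0 ((seq.toList.length : Int) - 2) 3).map
      (fun i => PySem.List.slice seq.toList (some i) (some (i + 3)))).filter
      (fun c => codons.any (fun s => s.toList == c) && (c.length == 3))) with hv
  have hcounter :
      ((PySem.List.pyRange 0 ((seq.toList.length : Int) - 2) 3).foldl
        (fun (d : PySem.Dict (List Char) Int) i =>
          if codons.any (fun s => s.toList == PySem.List.slice seq.toList (some i) (some (i + 3)))
              && ((PySem.List.slice seq.toList (some i) (some (i + 3))).length == 3) then
            d.insert (PySem.List.slice seq.toList (some i) (some (i + 3)))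
              ((d.getD (PySem.List.slice seq.toList (some i) (some (i + 3))) 0) + 1)
          else d)
        PySem.Dict.empty)
      = PySem.Dict.counter v :=
    foldl_guard_map (fun i => PySem.List.slice seq.toList (some i) (some (i + 3)))
      (fun c => codons.any (fun s => s.toList == c) && (c.length == 3))
      (fun (d : PySem.Dict (List Char) Int) c => d.insert c (d.getD c 0 + 1))
      (PySem.List.pyRange 0 ((seq.toList.length : Int) - 2) 3) PySem.Dict.empty
  rw [hcounter, Prod.mk.injEq]
  constructor
  · -- total_count
    rw [h1, zero_add,
        PySem.Dict.values_eq_map_keys _ (PySem.Dict.nodup_keys_counter v) 0,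
        PySem.Dict.keys_counter, foldl_add_eq_sum, zero_add]
    have hmc : (PySem.Set.ofList v).map (fun k => (PySem.Dict.counter v).getD k 0)
        = (PySem.Set.ofList v).map (fun k => (v.count k : Int)) :=
      List.map_congr_left (fun k _ => PySem.Dict.getD_counter v k)
    rw [hmc, sum_count_self]
  · -- codon_counts
    have hfnd := h2 ▸ hnd
    rw [PySem.Dict.items_eq_map_keys _ hfnd 0, h2, List.map_map]
    apply List.map_congr_left
    intro kv hm
    have hd0 : (cls.foldl (fun d kv => d.insert kv.1 0)
        (PySem.Dict.empty : PySem.Dict String Int)).getD kv.1 0 = 0 := by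
      apply PySem.Dict.getD_of_mem_items
      · rw [hinit]
        exact List.mem_map_of_mem hm
      · rw [hkeys0]; exact hnd
    rw [Function.comp_apply, h3 kv hm, hd0, zero_add, Prod.mk.injEq]
    refine ⟨rfl, ?_⟩
    rw [foldl_add_getD (PySem.Dict.counter v) (PySem.Set.ofList kv.2) 0, zero_add]
    have hmc : (PySem.Set.ofList kv.2).map (fun s => (PySem.Dict.counter v).getD s.toList 0)
        = (PySem.Set.ofList kv.2).map (fun s => (v.count s.toList : Int)) :=
      List.map_congr_left (fun s _ => PySem.Dict.getD_counter v s.toList)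
    rw [hmc, sum_count_eq_countP _ (PySem.Set.nodup_ofList kv.2) v]
    congr 1
    exact List.countP_congr (fun c _ => by rw [any_ofList])
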